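-- pv_equiv track=rewrite | github.com/greyesf1-ops/Tarea-vps-docker | apps/api/app/agent.py | ensure_two_questions
-- ===== SOURCE A (Python) =====
-- def ensure_two_questions(questions: list[str]) -> list[str]:
--     fallback = [
--         "¿Quien debe atender este caso o a que usuario afecta exactamente?",
--         "¿Que evidencia adicional o contexto operativo hace falta para cerrar el analisis?"
--     ]
--     combined = [question for question in questions if question]
--     for question in fallback:
--         if len(combined) >= 2:
--             break
--         if question not in combined:
--             combined.append(question)
--     return combined[:3]
-- ===== SOURCE B (Python) =====
-- def ensure_two_questions(questions: list[str]) -> list[str]: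
--     F1 = "¿Quien debe atender este caso o a que usuario afecta exactamente?"
--     F2 = "¿Que evidencia adicional o contexto operativo hace falta para cerrar el analisis?"
--     # early-exit scan: collect at most the first 3 truthy questions, then stop
--     head = []
--     for q in questions:
--         if q:
--             head.append(q)
--             if len(head) == 3:
--                 break
--     # explicit case dispatch on how many truthy questions were found
--     if len(head) >= 2:
--         return head
--     if len(head) == 0:
--         return [F1, F2]
--     q = head[0]
--     return [q, F2 if q == F1 else F1]
-- ===== Notes on version B (the rewrite author's own statement) =====
-- stated objective: alternative
-- what changed: Instead of filtering all questions and padding the filtered list with fallbacks in a membership-checked loop, B does an early-exit scan that collects at most the first three truthy questions and then dispatches explicitly on their count (0, 1, or >=2), picking the fallback(s) directly.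
import Mathlib
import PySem

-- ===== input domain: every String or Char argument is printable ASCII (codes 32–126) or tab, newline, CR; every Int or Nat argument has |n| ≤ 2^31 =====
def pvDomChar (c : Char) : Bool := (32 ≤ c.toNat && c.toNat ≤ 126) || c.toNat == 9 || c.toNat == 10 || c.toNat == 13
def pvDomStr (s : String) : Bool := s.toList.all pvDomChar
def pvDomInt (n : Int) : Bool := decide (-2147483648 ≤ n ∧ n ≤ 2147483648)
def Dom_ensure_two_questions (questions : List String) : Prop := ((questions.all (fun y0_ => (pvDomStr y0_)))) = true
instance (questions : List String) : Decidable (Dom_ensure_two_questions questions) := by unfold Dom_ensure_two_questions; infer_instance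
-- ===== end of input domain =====

-- B replaces A's filter-then-padding loop with an early-exit scan for the first three truthy questions followed by an explicit case dispatch on their count (objective: alternative).


-- ===== PORT A =====
-- the for-loop over fallback with its `break`: stop as soon as combined has ≥ 2 elements
def ensureLoopA : List String → List String → List String
  | [], combined => combined
  | q :: rest, combined =>
      if combined.length ≥ 2 then combined
      else ensureLoopA rest (if q ∈ combined then combined else combined ++ [q])

def ensure_two_questions (questions : List String) : List String :=
  let fallback := ["¿Quien debe atender este caso o a que usuario afecta exactamente?",
                   "¿Que evidencia adicional o contexto operativo hace falta para cerrar el analisis?"]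
  let combined := questions.filter (fun question => question ≠ "")  -- truthy str = nonempty
  (ensureLoopA fallback combined).take 3

-- ===== PORT B =====
-- early-exit scan: collect at most the first 3 truthy questions, then stop (the `break`)
def scanB : List String → List String → List String
  | [], head => head
  | q :: rest, head =>
      if q ≠ "" then
        let head' := head ++ [q]
        if head'.length = 3 then head' else scanB rest head'
      else scanB rest head

def ensure_two_questions_alt (questions : List String) : List String :=
  let F1 := "¿Quien debe atender este caso o a que usuario afecta exactamente?"
  let F2 := "¿Que evidencia adicional o contexto operativo hace falta para cerrar el analisis?"
  let head := scanB questions []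
  if head.length ≥ 2 then head
  else if head.length = 0 then [F1, F2]
  else
    let q := head.headD ""   -- head[0]; head is nonempty in this branch
    [q, if q = F1 then F2 else F1]

-- ===== PRECONDITION & SPEC =====
def Spec_ensure_two_questions (questions : List String) (out : List String) : Prop := out = ensure_two_questions_alt questions
instance (questions : List String) (out : List String) : Decidable (Spec_ensure_two_questions questions out) := by unfold Spec_ensure_two_questions; infer_instance

-- ===== CLAIM (what is proved, stated in full; the proofs are below) =====
def Claim_equal_ensure_two_questions : Prop := ∀ (questions : List String), Dom_ensure_two_questions questions → Spec_ensure_two_questions questions (ensure_two_questions questions)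

-- ===== LEMMAS AND PROOFS =====

-- B's early-exit scan collects exactly the first 3 truthy questions
theorem scanB_eq (qs : List String) : ∀ (head : List String), head.length < 3 →
    scanB qs head = (head ++ qs.filter (fun q => q ≠ "")).take 3 := by
  induction qs with
  | nil =>
      intro head h
      simp [scanB, List.take_of_length_le, Nat.le_of_lt h]
  | cons q rest ih =>
      intro head h
      by_cases hq : q = ""
      · simp [scanB, hq, ih head h]
      · have hfil : (q :: rest).filter (fun x => x ≠ "") = q :: rest.filter (fun x => x ≠ "") := by
          simp [hq]
        have hassoc : head ++ q :: rest.filter (fun x => x ≠ "")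
            = (head ++ [q]) ++ rest.filter (fun x => x ≠ "") := by simp
        simp only [scanB, hq, ne_eq, not_false_eq_true, if_true, hfil, hassoc]
        by_cases h3 : (head ++ [q]).length = 3
        · rw [if_pos h3, List.take_append_of_le_length (by omega),
            List.take_of_length_le (Nat.le_of_eq h3)]
        · have hlt : (head ++ [q]).length < 3 := by
            simp at h3 ⊢; omega
          rw [if_neg h3, ih _ hlt]

-- A's fallback loop equals the count-then-fill expression (any starting list c)
theorem ensureLoopA_eq (c : List String) :
    ensureLoopA ["¿Quien debe atender este caso o a que usuario afecta exactamente?",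
                 "¿Que evidencia adicional o contexto operativo hace falta para cerrar el analisis?"] c
      = c ++ ((["¿Quien debe atender este caso o a que usuario afecta exactamente?",
                "¿Que evidencia adicional o contexto operativo hace falta para cerrar el analisis?"] : List String).filter (fun q => q ∉ c)).take (2 - c.length) := by
  match c with
  | [] => simp [ensureLoopA]
  | [a] =>
      simp only [ensureLoopA, List.length_cons, List.length_nil]
      by_cases h1 : "¿Quien debe atender este caso o a que usuario afecta exactamente?" ∈ [a] <;>
      by_cases h2 : "¿Que evidencia adicional o contexto operativo hace falta para cerrar el analisis?" ∈ [a] <;>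
        simp_all [List.filter, List.take]
  | a :: b :: rest =>
      simp [ensureLoopA, Nat.sub_eq_zero_of_le]

-- ===== VERDICT (by name: the statement is the Claim_ definition above) =====
theorem ensure_two_questions_spec : Claim_equal_ensure_two_questions := by
  intro questions _
  unfold Spec_ensure_two_questions ensure_two_questions ensure_two_questions_alt
  simp only [ensureLoopA_eq, scanB_eq questions [] (by simp), List.nil_append]
  match hc : questions.filter (fun q => q ≠ "") with
  | [] => simp [List.take]
  | [a] =>
      by_cases h1 : a = "¿Quien debe atender este caso o a que usuario afecta exactamente?"
      · subst h1
        simp [List.take]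
      · have e1 : (decide (("¿Quien debe atender este caso o a que usuario afecta exactamente?" : String) = a)) = false :=
          decide_eq_false (fun h => h1 h.symm)
        simp [List.filter_cons, e1, h1, List.take]
  | a :: b :: rest =>
      have : ((a :: b :: rest).take 3).length ≥ 2 := by
        cases rest <;> simp [List.take]
      simp [Nat.sub_eq_zero_of_le]
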